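-- pv_equiv track=rewrite | github.com/Worldwidebro/iza-os-specs | IZA_OS/02_AGENT_ORCHESTRATION/workers/memu_knowledge_graph_generator.py | _categorize_folder
-- ===== SOURCE A (Python) =====
-- def _categorize_folder(path: str) -> str:
--     """Categorize folder based on path"""
--
--     path_lower = path.lower()
--
--     if any(x in path_lower for x in ["iza", "agent", "ai_"]):
--         return "AI_AGENT_SYSTEMS"
--     elif any(x in path_lower for x in ["business", "venture", "company"]):
--         return "BUSINESS_ECOSYSTEM"
--     elif any(x in path_lower for x in ["memory", "knowledge", "data"]):
--         return "KNOWLEDGE_MANAGEMENT"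
--     elif any(x in path_lower for x in ["config", "setup", "deploy"]):
--         return "SYSTEM_CONFIGURATION"
--     elif any(x in path_lower for x in ["workflow", "automation", "n8n"]):
--         return "WORKFLOW_AUTOMATION"
--     elif any(x in path_lower for x in ["monitoring", "dashboard", "logs"]):
--         return "MONITORING_ANALYTICS"
--     elif any(x in path_lower for x in ["security", "auth", "compliance"]):
--         return "SECURITY_COMPLIANCE"
--     elif any(x in path_lower for x in ["ui", "ux", "frontend", "design"]):
--         return "USER_INTERFACE"
--     elif any(x in path_lower for x in ["api", "backend", "server"]):
--         return "BACKEND_SERVICES"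
--     elif any(x in path_lower for x in ["docker", "container", "infra"]):
--         return "INFRASTRUCTURE"
--     else:
--         return "GENERAL"
-- ===== SOURCE B (Python) =====
-- # Each keyword maps to (priority, category); lower priority wins.
-- _KEYWORD_MAP = {
--     "iza": (0, "AI_AGENT_SYSTEMS"), "agent": (0, "AI_AGENT_SYSTEMS"), "ai_": (0, "AI_AGENT_SYSTEMS"),
--     "business": (1, "BUSINESS_ECOSYSTEM"), "venture": (1, "BUSINESS_ECOSYSTEM"), "company": (1, "BUSINESS_ECOSYSTEM"),
--     "memory": (2, "KNOWLEDGE_MANAGEMENT"), "knowledge": (2, "KNOWLEDGE_MANAGEMENT"), "data": (2, "KNOWLEDGE_MANAGEMENT"),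
--     "config": (3, "SYSTEM_CONFIGURATION"), "setup": (3, "SYSTEM_CONFIGURATION"), "deploy": (3, "SYSTEM_CONFIGURATION"),
--     "workflow": (4, "WORKFLOW_AUTOMATION"), "automation": (4, "WORKFLOW_AUTOMATION"), "n8n": (4, "WORKFLOW_AUTOMATION"),
--     "monitoring": (5, "MONITORING_ANALYTICS"), "dashboard": (5, "MONITORING_ANALYTICS"), "logs": (5, "MONITORING_ANALYTICS"),
--     "security": (6, "SECURITY_COMPLIANCE"), "auth": (6, "SECURITY_COMPLIANCE"), "compliance": (6, "SECURITY_COMPLIANCE"),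
--     "ui": (7, "USER_INTERFACE"), "ux": (7, "USER_INTERFACE"), "frontend": (7, "USER_INTERFACE"), "design": (7, "USER_INTERFACE"),
--     "api": (8, "BACKEND_SERVICES"), "backend": (8, "BACKEND_SERVICES"), "server": (8, "BACKEND_SERVICES"),
--     "docker": (9, "INFRASTRUCTURE"), "container": (9, "INFRASTRUCTURE"), "infra": (9, "INFRASTRUCTURE"),
-- }
--
--
-- def _categorize_folder(path: str) -> str:
--     """Categorize folder: one full pass keeping the minimum-priority matching keyword."""
--     path_lower = path.lower()
--     best = None
--     for keyword, (priority, category) in _KEYWORD_MAP.items():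
--         if keyword in path_lower and (best is None or priority < best[0]):
--             best = (priority, category)
--     return "GENERAL" if best is None else best[1]
-- ===== Notes on version B (the rewrite author's own statement) =====
-- stated objective: alternative
-- what changed: Replaces the ordered early-exit if/elif ladder of grouped substring tests by one full accumulator pass over a flat keyword -> (priority, category) map that keeps the minimum-priority matching keyword and selects its category at the end.
import Mathlib
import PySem

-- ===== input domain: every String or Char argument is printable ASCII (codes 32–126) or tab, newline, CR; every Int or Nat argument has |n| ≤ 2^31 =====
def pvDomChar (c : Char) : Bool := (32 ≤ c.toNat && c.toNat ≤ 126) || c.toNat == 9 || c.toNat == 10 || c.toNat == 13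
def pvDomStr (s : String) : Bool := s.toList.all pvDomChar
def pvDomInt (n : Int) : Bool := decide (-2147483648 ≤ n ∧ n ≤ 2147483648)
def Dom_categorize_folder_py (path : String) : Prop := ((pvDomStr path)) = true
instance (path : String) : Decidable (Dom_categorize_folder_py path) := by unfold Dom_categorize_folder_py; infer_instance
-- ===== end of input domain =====

-- B replaces A's ordered early-exit if/elif ladder by one full accumulator pass over a flat
-- keyword → (priority, category) map, keeping the minimum-priority match (objective: alternative).

-- ===== PORT A =====
def categorize_folder_py (path : String) : String :=
  let path_lower := PySem.Str.lower path
  if ["iza", "agent", "ai_"].any (fun x => PySem.Str.isIn x path_lower) then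
    "AI_AGENT_SYSTEMS"
  else if ["business", "venture", "company"].any (fun x => PySem.Str.isIn x path_lower) then
    "BUSINESS_ECOSYSTEM"
  else if ["memory", "knowledge", "data"].any (fun x => PySem.Str.isIn x path_lower) then
    "KNOWLEDGE_MANAGEMENT"
  else if ["config", "setup", "deploy"].any (fun x => PySem.Str.isIn x path_lower) then
    "SYSTEM_CONFIGURATION"
  else if ["workflow", "automation", "n8n"].any (fun x => PySem.Str.isIn x path_lower) then
    "WORKFLOW_AUTOMATION"
  else if ["monitoring", "dashboard", "logs"].any (fun x => PySem.Str.isIn x path_lower) then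
    "MONITORING_ANALYTICS"
  else if ["security", "auth", "compliance"].any (fun x => PySem.Str.isIn x path_lower) then
    "SECURITY_COMPLIANCE"
  else if ["ui", "ux", "frontend", "design"].any (fun x => PySem.Str.isIn x path_lower) then
    "USER_INTERFACE"
  else if ["api", "backend", "server"].any (fun x => PySem.Str.isIn x path_lower) then
    "BACKEND_SERVICES"
  else if ["docker", "container", "infra"].any (fun x => PySem.Str.isIn x path_lower) then
    "INFRASTRUCTURE"
  else
    "GENERAL"

-- ===== PORT B =====
-- _KEYWORD_MAP in insertion (= iteration) order: keyword → (priority, category)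
def pvKeywordMap : List (String × Nat × String) :=
  [ ("iza", 0, "AI_AGENT_SYSTEMS"),
    ("agent", 0, "AI_AGENT_SYSTEMS"),
    ("ai_", 0, "AI_AGENT_SYSTEMS"),
    ("business", 1, "BUSINESS_ECOSYSTEM"),
    ("venture", 1, "BUSINESS_ECOSYSTEM"),
    ("company", 1, "BUSINESS_ECOSYSTEM"),
    ("memory", 2, "KNOWLEDGE_MANAGEMENT"),
    ("knowledge", 2, "KNOWLEDGE_MANAGEMENT"),
    ("data", 2, "KNOWLEDGE_MANAGEMENT"),
    ("config", 3, "SYSTEM_CONFIGURATION"),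
    ("setup", 3, "SYSTEM_CONFIGURATION"),
    ("deploy", 3, "SYSTEM_CONFIGURATION"),
    ("workflow", 4, "WORKFLOW_AUTOMATION"),
    ("automation", 4, "WORKFLOW_AUTOMATION"),
    ("n8n", 4, "WORKFLOW_AUTOMATION"),
    ("monitoring", 5, "MONITORING_ANALYTICS"),
    ("dashboard", 5, "MONITORING_ANALYTICS"),
    ("logs", 5, "MONITORING_ANALYTICS"),
    ("security", 6, "SECURITY_COMPLIANCE"),
    ("auth", 6, "SECURITY_COMPLIANCE"),
    ("compliance", 6, "SECURITY_COMPLIANCE"),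
    ("ui", 7, "USER_INTERFACE"),
    ("ux", 7, "USER_INTERFACE"),
    ("frontend", 7, "USER_INTERFACE"),
    ("design", 7, "USER_INTERFACE"),
    ("api", 8, "BACKEND_SERVICES"),
    ("backend", 8, "BACKEND_SERVICES"),
    ("server", 8, "BACKEND_SERVICES"),
    ("docker", 9, "INFRASTRUCTURE"),
    ("container", 9, "INFRASTRUCTURE"),
    ("infra", 9, "INFRASTRUCTURE") ]

-- one full pass: keep the (priority, category) of the minimum-priority matching keyword
def categorize_folder_py_alt (path : String) : String :=
  let path_lower := PySem.Str.lower path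
  let best := pvKeywordMap.foldl
    (fun best kv =>
      if PySem.Str.isIn kv.1 path_lower &&
         (match best with | none => true | some b => decide (kv.2.1 < b.1)) then
        some kv.2
      else best) none
  match best with
  | none => "GENERAL"
  | some b => b.2

-- ===== PRECONDITION & SPEC =====
def Spec_categorize_folder_py (path : String) (out : String) : Prop := out = categorize_folder_py_alt path
instance (path : String) (out : String) : Decidable (Spec_categorize_folder_py path out) := by unfold Spec_categorize_folder_py; infer_instance

-- ===== CLAIM (what is proved, stated in full; the proofs are below) =====
def Claim_equal_categorize_folder_py : Prop := ∀ (path : String), Dom_categorize_folder_py path → Spec_categorize_folder_py path (categorize_folder_py path)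

-- ===== LEMMAS AND PROOFS =====

-- ===== VERDICT (by name: the statement is the Claim_ definition above) =====
theorem categorize_folder_py_spec : Claim_equal_categorize_folder_py := by
  intro path _
  unfold Spec_categorize_folder_py categorize_folder_py categorize_folder_py_alt pvKeywordMap
  by_cases h1 : PySem.Str.isIn "iza" (PySem.Str.lower path) = true
  · simp_all
  by_cases h2 : PySem.Str.isIn "agent" (PySem.Str.lower path) = true
  · simp_all
  by_cases h3 : PySem.Str.isIn "ai_" (PySem.Str.lower path) = true
  · simp_all
  by_cases h4 : PySem.Str.isIn "business" (PySem.Str.lower path) = true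
  · simp_all
  by_cases h5 : PySem.Str.isIn "venture" (PySem.Str.lower path) = true
  · simp_all
  by_cases h6 : PySem.Str.isIn "company" (PySem.Str.lower path) = true
  · simp_all
  by_cases h7 : PySem.Str.isIn "memory" (PySem.Str.lower path) = true
  · simp_all
  by_cases h8 : PySem.Str.isIn "knowledge" (PySem.Str.lower path) = true
  · simp_all
  by_cases h9 : PySem.Str.isIn "data" (PySem.Str.lower path) = true
  · simp_all
  by_cases h10 : PySem.Str.isIn "config" (PySem.Str.lower path) = true
  · simp_all
  by_cases h11 : PySem.Str.isIn "setup" (PySem.Str.lower path) = true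
  · simp_all
  by_cases h12 : PySem.Str.isIn "deploy" (PySem.Str.lower path) = true
  · simp_all
  by_cases h13 : PySem.Str.isIn "workflow" (PySem.Str.lower path) = true
  · simp_all
  by_cases h14 : PySem.Str.isIn "automation" (PySem.Str.lower path) = true
  · simp_all
  by_cases h15 : PySem.Str.isIn "n8n" (PySem.Str.lower path) = true
  · simp_all
  by_cases h16 : PySem.Str.isIn "monitoring" (PySem.Str.lower path) = true
  · simp_all
  by_cases h17 : PySem.Str.isIn "dashboard" (PySem.Str.lower path) = true
  · simp_all
  by_cases h18 : PySem.Str.isIn "logs" (PySem.Str.lower path) = true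
  · simp_all
  by_cases h19 : PySem.Str.isIn "security" (PySem.Str.lower path) = true
  · simp_all
  by_cases h20 : PySem.Str.isIn "auth" (PySem.Str.lower path) = true
  · simp_all
  by_cases h21 : PySem.Str.isIn "compliance" (PySem.Str.lower path) = true
  · simp_all
  by_cases h22 : PySem.Str.isIn "ui" (PySem.Str.lower path) = true
  · simp_all
  by_cases h23 : PySem.Str.isIn "ux" (PySem.Str.lower path) = true
  · simp_all
  by_cases h24 : PySem.Str.isIn "frontend" (PySem.Str.lower path) = true
  · simp_all
  by_cases h25 : PySem.Str.isIn "design" (PySem.Str.lower path) = true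
  · simp_all
  by_cases h26 : PySem.Str.isIn "api" (PySem.Str.lower path) = true
  · simp_all
  by_cases h27 : PySem.Str.isIn "backend" (PySem.Str.lower path) = true
  · simp_all
  by_cases h28 : PySem.Str.isIn "server" (PySem.Str.lower path) = true
  · simp_all
  by_cases h29 : PySem.Str.isIn "docker" (PySem.Str.lower path) = true
  · simp_all
  by_cases h30 : PySem.Str.isIn "container" (PySem.Str.lower path) = true
  · simp_all
  by_cases h31 : PySem.Str.isIn "infra" (PySem.Str.lower path) = true
  · simp_all
  simp_all
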